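-- pv_equiv track=rewrite | github.com/AdamZhouSE/pythonHomework | Code/CodeRecords/2560/60791/261234.py | solve
-- ===== SOURCE A (Python) =====
-- from collections import Counter
--
-- def solve(n,a,m):
--     dic = dict(Counter(a))
--     val = []
--     for key,value in dic.items():
--         val.append(value)
--     val = sorted(val)
--     count = 0
--     for item in val:
--         if(m>=item):
--             m-=item
--             count+=1
--         else:
--             break
--     return len(val)-count
-- ===== SOURCE B (Python) =====
-- from collections import Counter
--
-- def solve(n, a, m):
--     counts = Counter(a)
--     hist = Counter(counts.values())  # group size -> number of groups of that size
--     remaining = len(counts)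
--     for f in range(1, max(hist, default=0) + 1):
--         if m < f:
--             break
--         take = min(hist.get(f, 0), m // f)
--         remaining -= take
--         m -= take * f
--     return remaining
-- ===== Notes on version B (the rewrite author's own statement) =====
-- stated objective: alternative
-- what changed: Replaced A's comparison sort of the group frequencies plus one-by-one greedy subtraction with a counting-sort-style bucket scan: a histogram of group sizes is walked in increasing size and each whole bucket is removed at once with a division (take = min(bucket, m // f)), no sort and no per-group loop.
import Mathlib
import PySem

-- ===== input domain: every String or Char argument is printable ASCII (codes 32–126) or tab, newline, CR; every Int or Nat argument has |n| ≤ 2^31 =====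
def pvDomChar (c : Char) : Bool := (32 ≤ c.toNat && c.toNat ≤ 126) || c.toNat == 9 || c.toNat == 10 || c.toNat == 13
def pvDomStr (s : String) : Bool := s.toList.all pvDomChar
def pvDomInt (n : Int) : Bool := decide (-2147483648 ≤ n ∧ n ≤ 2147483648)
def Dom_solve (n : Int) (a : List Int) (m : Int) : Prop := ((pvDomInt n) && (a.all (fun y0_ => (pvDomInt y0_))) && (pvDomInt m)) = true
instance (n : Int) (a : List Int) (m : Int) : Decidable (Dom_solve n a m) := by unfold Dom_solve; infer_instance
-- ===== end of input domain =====

-- B replaces A's sort-the-frequencies-then-greedily-subtract strategy by a counting-sort-style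
-- bucket scan: a histogram of group sizes walked in increasing size, removing each whole bucket
-- with one division instead of one-by-one subtraction; no comparison sort at all.

-- ===== PORT A =====
-- A's 'for item in val: if m >= item: m -= item; count += 1; else: break'
def solveLoopA : List Int → Int → Int → Int
  | [], _, count => count
  | item :: rest, m, count =>
    if m ≥ item then solveLoopA rest (m - item) (count + 1) else count

def solve (n : Int) (a : List Int) (m : Int) : Int :=
  let dic := PySem.Dict.counter a
  let val : List Int := dic.items.foldl (fun acc kv => acc ++ [kv.2]) []
  let val2 := PySem.List.sorted val (fun x => x) false
  (val2.length : Int) - solveLoopA val2 m 0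

-- ===== PORT B =====
-- B's 'for f in range(1, maxf+1): if m < f: break; take = min(hist.get(f,0), m//f); …'
def bucketLoopB : List Int → PySem.Dict Int Int → Int → Int → Int
  | [], _, _, remaining => remaining
  | f :: fs, hist, m, remaining =>
    if m < f then remaining
    else
      let take := min (hist.getD f 0) (PySem.Int.floordiv m f)
      bucketLoopB fs hist (m - take * f) (remaining - take)

def solve_alt (n : Int) (a : List Int) (m : Int) : Int :=
  let counts := PySem.Dict.counter a
  let hist := PySem.Dict.counter counts.values
  let maxf := PySem.List.maxD hist.keys (fun x => x) 0
  bucketLoopB (PySem.List.pyRange 1 (maxf + 1) 1) hist m (counts.size : Int)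

-- ===== PRECONDITION & SPEC =====
def Spec_solve (n : Int) (a : List Int) (m : Int) (out : Int) : Prop := out = solve_alt n a m
instance (n : Int) (a : List Int) (m : Int) (out : Int) : Decidable (Spec_solve n a m out) := by unfold Spec_solve; infer_instance

-- ===== CLAIM (what is proved, stated in full; the proofs are below) =====
def Claim_equal_solve : Prop := ∀ (n : Int) (a : List Int) (m : Int), Dom_solve n a m → Spec_solve n a m (solve n a m)

-- ===== LEMMAS AND PROOFS =====

-- A's value-collecting loop is mapping .2 over the items
theorem pv_foldl_snd (l : List (Int × Int)) (acc : List Int) :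
    l.foldl (fun acc kv => acc ++ [kv.2]) acc = acc ++ l.map (·.2) := by
  induction l generalizing acc with
  | nil => simp
  | cons p t ih => simp [List.foldl, ih]

-- accumulator shift of A's loop
theorem solveLoopA_shift (s : List Int) : ∀ m c, solveLoopA s m c = c + solveLoopA s m 0 := by
  induction s with
  | nil => intro m c; simp [solveLoopA]
  | cons x xs ih =>
    intro m c
    simp only [solveLoopA]
    split_ifs with h
    · rw [ih (m - x) (c + 1), ih (m - x) (0 + 1)]; ring
    · simp

-- A's loop stops immediately when every element exceeds the budget
theorem solveLoopA_stop (s : List Int) (m c : Int) (h : ∀ x ∈ s, m < x) :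
    solveLoopA s m c = c := by
  cases s with
  | nil => rfl
  | cons x xs =>
    have := h x (by simp)
    simp only [solveLoopA]
    rw [if_neg (by omega)]

-- a sorted list whose elements are ≥ f splits into the block of f's and the strictly larger rest
theorem sorted_split (s : List Int) (f : Int) (hs : s.Pairwise (· ≤ ·))
    (hf : ∀ x ∈ s, f ≤ x) :
    s = List.replicate (s.count f) f ++ s.filter (fun x => f < x) := by
  induction s with
  | nil => simp
  | cons x xs ih =>
    rcases (List.pairwise_cons.mp hs) with ⟨hx, hxs⟩
    by_cases hxf : x = f
    · subst hxf
      simp only [List.count_cons_self, List.replicate_succ, List.filter_cons,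
        decide_eq_true_eq, List.cons_append]
      rw [if_neg (by omega)]
      rw [← ih hxs (fun y hy => hf y (by simp [hy]))]
    · have hfx : f < x := lt_of_le_of_ne (hf x (by simp)) (fun h => hxf h.symm)
      have hall : ∀ y ∈ x :: xs, f < y := by
        intro y hy
        rcases List.mem_cons.mp hy with rfl | hy'
        · exact hfx
        · exact lt_of_lt_of_le hfx (hx y hy')
      have hcount : (x :: xs).count f = 0 := by
        rw [List.count_eq_zero]
        intro hmem
        exact absurd rfl (ne_of_gt (hall f hmem)).symm
      rw [hcount]
      simp only [List.replicate_zero, List.nil_append]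
      rw [List.filter_eq_self.mpr (fun y hy => decide_eq_true (hall y hy))]

-- A's greedy loop on a block of k copies of f followed by strictly larger elements
theorem solveLoopA_block (k : Nat) (f : Int) (s' : List Int) (hf : 1 ≤ f)
    (hs' : ∀ x ∈ s', f < x) : ∀ m c,
    solveLoopA (List.replicate k f ++ s') m c =
      if m < f then c
      else if m < (k : Int) * f then c + m / f
      else c + k + solveLoopA s' (m - (k : Int) * f) 0 := by
  induction k with
  | zero =>
    intro m c
    simp only [List.replicate_zero, List.nil_append, Nat.cast_zero, zero_mul]
    split_ifs with h1 h2
    · exact solveLoopA_stop s' m c (fun x hx => lt_trans h1 (hs' x hx))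
    · omega
    · rw [solveLoopA_shift s' m c]; ring_nf
  | succ k ih =>
    intro m c
    rw [List.replicate_succ]
    simp only [List.cons_append, solveLoopA]
    push_cast
    by_cases h1 : m < f
    · rw [if_neg (by omega), if_pos h1]
    · rw [if_pos (by omega : m ≥ f), ih (m - f) (c + 1), if_neg h1]
      have hf0 : (0 : Int) < f := by omega
      have hdiv : m / f = (m - f) / f + 1 := by
        conv_lhs => rw [show m = (m - f) + 1 * f by ring]
        rw [Int.add_mul_ediv_right _ _ (by omega : f ≠ 0)]
      by_cases h2 : m - f < f
      · rw [if_pos h2]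
        have h0 : (m - f) / f = 0 := Int.ediv_eq_zero_of_lt (by omega) h2
        by_cases hk : k = 0
        · subst hk
          push_cast
          rw [if_neg (by rw [one_mul]; exact h1)]
          rw [solveLoopA_stop s' (m - 1 * f) 0 (fun x hx => by have := hs' x hx; omega)]
          ring
        · have hk1 : (1 : Int) ≤ (k : Int) := by exact_mod_cast Nat.one_le_iff_ne_zero.mpr hk
          have hlt : m < ((k : Int) + 1) * f := by nlinarith
          rw [if_pos hlt, hdiv, h0]
          ring
      · rw [if_neg h2]
        by_cases h3 : m - f < (k : Int) * f
        · rw [if_pos h3, if_pos (by nlinarith : m < ((k : Int) + 1) * f), hdiv]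
          ring
        · rw [if_neg h3, if_neg (by nlinarith : ¬ m < ((k : Int) + 1) * f)]
          have he : m - f - (k : Int) * f = m - ((k : Int) + 1) * f := by ring
          rw [he]
          ring

-- the bucket walk over [f, F] equals A's greedy loop on the matching sorted list
theorem bucket_main (d : Nat) : ∀ (f F m r : Int) (s : List Int) (hist : PySem.Dict Int Int),
    (F + 1 - f).toNat ≤ d → 1 ≤ f →
    s.Pairwise (· ≤ ·) → (∀ x ∈ s, f ≤ x ∧ x ≤ F) →
    (∀ g, f ≤ g → hist.getD g 0 = (s.count g : Int)) →
    bucketLoopB (PySem.List.pyRange f (F + 1) 1) hist m r = r - solveLoopA s m 0 := by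
  induction d with
  | zero =>
    intro f F m r s hist hd hf hsort hbound hcnt
    have hFf : F + 1 ≤ f := by omega
    have hs : s = [] := by
      cases s with
      | nil => rfl
      | cons x xs => have := hbound x (by simp); omega
    subst hs
    rw [PySem.List.pyRange_one_eq_nil hFf]
    simp [bucketLoopB, solveLoopA]
  | succ d ih =>
    intro f F m r s hist hd hf hsort hbound hcnt
    by_cases hfF : F + 1 ≤ f
    · have hs : s = [] := by
        cases s with
        | nil => rfl
        | cons x xs => have := hbound x (by simp); omega
      subst hs
      rw [PySem.List.pyRange_one_eq_nil hfF]
      simp [bucketLoopB, solveLoopA]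
    · have hf0 : (0 : Int) < f := by omega
      rw [PySem.List.pyRange_one_cons (by omega : f < F + 1)]
      simp only [bucketLoopB]
      by_cases hm : m < f
      · rw [if_pos hm, solveLoopA_stop s m 0 (fun x hx => lt_of_lt_of_le hm (hbound x hx).1)]
        ring
      · rw [if_neg hm]
        have hsplit := sorted_split s f hsort (fun x hx => (hbound x hx).1)
        set k : Nat := s.count f with hk
        set s' := s.filter (fun x => f < x) with hs'
        have hs'gt : ∀ x ∈ s', f < x := by
          intro x hx
          have := List.of_mem_filter hx
          simpa using this
        have hs'mem : ∀ x ∈ s', x ∈ s := fun x hx => List.mem_of_mem_filter hx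
        have hs'bound : ∀ x ∈ s', f + 1 ≤ x ∧ x ≤ F := by
          intro x hx
          exact ⟨by have := hs'gt x hx; omega, (hbound x (hs'mem x hx)).2⟩
        have hs'sort : s'.Pairwise (· ≤ ·) := List.Pairwise.filter _ hsort
        have hs'cnt : ∀ g, f + 1 ≤ g → hist.getD g 0 = (s'.count g : Int) := by
          intro g hg
          rw [hcnt g (by omega)]
          congr 1
          conv_lhs => rw [hsplit]
          rw [List.count_append, List.count_replicate, if_neg (by simp; omega)]
          omega
        have hgd : hist.getD f 0 = (k : Int) := hcnt f le_rfl
        rw [hgd, PySem.Int.floordiv_eq_ediv_of_pos hf0]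
        have hAloop : solveLoopA s m 0 =
            if m < f then 0
            else if m < (k : Int) * f then m / f
            else (k : Int) + solveLoopA s' (m - (k : Int) * f) 0 := by
          conv_lhs => rw [hsplit]
          rw [solveLoopA_block k f s' hf hs'gt m 0]
          split_ifs <;> ring
        by_cases hkm : m < (k : Int) * f
        · -- only m/f groups fit; afterwards less than f budget remains
          have htake : min (k : Int) (m / f) = m / f := by
            have : m / f < (k : Int) := by
              rw [← PySem.Int.floordiv_eq_ediv_of_pos hf0]
              exact (PySem.Int.floordiv_lt_iff_lt_mul hf0).mpr hkm
            omega
          rw [htake]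
          rw [ih (f + 1) F (m - m / f * f) (r - m / f) s' hist (by omega) (by omega)
            hs'sort hs'bound hs'cnt]
          have hmod : m - m / f * f = m % f := by rw [Int.emod_def]; ring
          have hstop : solveLoopA s' (m - m / f * f) 0 = 0 := by
            apply solveLoopA_stop
            intro x hx
            have h1 := Int.emod_nonneg m (by omega : f ≠ 0)
            have h2 := Int.emod_lt_of_pos m hf0
            have := hs'gt x hx
            omega
          rw [hstop, hAloop, if_neg hm, if_pos hkm]
          ring
        · -- the whole bucket fits
          have htake : min (k : Int) (m / f) = (k : Int) := by
            have : (k : Int) ≤ m / f := by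
              rw [← PySem.Int.floordiv_eq_ediv_of_pos hf0]
              exact (PySem.Int.le_floordiv_iff_mul_le hf0).mpr (by omega)
            omega
          rw [htake]
          rw [ih (f + 1) F (m - (k : Int) * f) (r - (k : Int)) s' hist (by omega) (by omega)
            hs'sort hs'bound hs'cnt]
          rw [hAloop, if_neg hm, if_neg hkm]
          ring

-- every frequency produced by Counter is positive
theorem values_counter_pos (a : List Int) :
    ∀ v ∈ (PySem.Dict.counter a).values, 0 < v := by
  intro v hv
  have : v ∈ (PySem.Dict.counter a).items.map (·.2) := hv
  rw [PySem.Dict.items_counter] at this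
  simp only [List.map_map, List.mem_map] at this
  obtain ⟨kk, hk, hkv⟩ := this
  have hka : kk ∈ a := (PySem.Set.mem_ofList a kk).mp hk
  have : 0 < a.count kk := List.count_pos_iff.mpr hka
  simp only [Function.comp] at hkv
  omega

-- ===== VERDICT (by name: the statement is the Claim_ definition above) =====
theorem solve_spec : Claim_equal_solve := by
  intro n a m _
  simp only [Spec_solve, solve, solve_alt]
  rw [pv_foldl_snd, List.nil_append]
  set vals : List Int := (PySem.Dict.counter a).values with hvals
  rw [show (PySem.Dict.counter a).items.map (·.2) = vals from rfl]
  set s := PySem.List.sorted vals (fun x => x) false with hsdef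
  set maxf := PySem.List.maxD (PySem.Dict.counter vals).keys (fun x => x) 0 with hmaxf
  have hperm : s.Perm vals := PySem.List.sorted_perm vals (fun x => x) false
  have hsize : ((PySem.Dict.counter a).size : Int) = (s.length : Int) := by
    have h1 : s.length = vals.length := PySem.List.length_sorted vals (fun x => x) false
    rw [h1, hvals]
    simp [PySem.Dict.size, PySem.Dict.values]
  have hsort : s.Pairwise (· ≤ ·) := by
    simpa using PySem.List.sorted_pairwise vals (fun x => x)
  have hmem : ∀ x ∈ s, x ∈ vals := fun x hx => (PySem.List.mem_sorted vals _ _ x).mp hx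
  have hbound : ∀ x ∈ s, (1 : Int) ≤ x ∧ x ≤ maxf := by
    intro x hx
    have hxv : x ∈ vals := hmem x hx
    refine ⟨by have := values_counter_pos a x hxv; omega, ?_⟩
    have hxk : x ∈ (PySem.Dict.counter vals).keys := by
      rw [PySem.Dict.keys_counter]
      exact (PySem.Set.mem_ofList vals x).mpr hxv
    cases hmq : PySem.List.max? (PySem.Dict.counter vals).keys (fun x => x) with
    | none =>
      rw [PySem.List.max?_eq_none_iff] at hmq
      rw [hmq] at hxk
      cases hxk
    | some mm =>
      have hle : x ≤ mm := PySem.List.max?_isMax hmq x hxk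
      have : maxf = mm := by
        rw [hmaxf]
        simp only [PySem.List.maxD, hmq, Option.getD_some]
      omega
  have hcnt : ∀ g : Int, (1 : Int) ≤ g →
      (PySem.Dict.counter vals).getD g 0 = (s.count g : Int) := by
    intro g _
    rw [PySem.Dict.getD_counter vals g]
    exact_mod_cast (hperm.count_eq g).symm
  rw [bucket_main (maxf + 1 - 1).toNat 1 maxf m ((PySem.Dict.counter a).size : Int) s
    (PySem.Dict.counter vals) le_rfl le_rfl hsort hbound hcnt]
  rw [hsize]
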